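-- pv_equiv track=rewrite | github.com/pypi-data/pypi-mirror-4 | packages/AdHoc/AdHoc-0.1.1.tar.gz/AdHoc-0.1.1/adhoc.py | strquote
-- ===== SOURCE A (Python) =====
-- def strquote(source, indent=(' ' * 4)):                  # |:fnc:|
--     source = source.replace("'", "\\'")
--     length = 78 - 2 - 4 - len(indent)
--     if length < 50:
--         length = 50
--     output_parts = []
--     indx = 0
--     limit = len(source)
--     while indx < limit:
--         output_parts.extend((
--             indent, "    '", source[indx:indx+length], "'\n"))
--         indx += length
--     return ''.join(output_parts)
-- ===== SOURCE B (Python) =====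
-- import re
--
--
-- def strquote(source, indent=(' ' * 4)):
--     source = source.replace("'", "\\'")
--     length = max(50, 72 - len(indent))
--     chunks = re.findall('.{1,%d}' % length, source, re.S)
--     return ''.join(indent + "    '" + chunk + "'\n" for chunk in chunks)
-- ===== Notes on version B (the rewrite author's own statement) =====
-- stated objective: idiomatic
-- what changed: The manual while-loop with explicit index arithmetic and a growing parts list is replaced by one-shot DOTALL-regex segmentation into chunks of at most `length` characters, each formatted by a generator expression and joined.
import Mathlib
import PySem

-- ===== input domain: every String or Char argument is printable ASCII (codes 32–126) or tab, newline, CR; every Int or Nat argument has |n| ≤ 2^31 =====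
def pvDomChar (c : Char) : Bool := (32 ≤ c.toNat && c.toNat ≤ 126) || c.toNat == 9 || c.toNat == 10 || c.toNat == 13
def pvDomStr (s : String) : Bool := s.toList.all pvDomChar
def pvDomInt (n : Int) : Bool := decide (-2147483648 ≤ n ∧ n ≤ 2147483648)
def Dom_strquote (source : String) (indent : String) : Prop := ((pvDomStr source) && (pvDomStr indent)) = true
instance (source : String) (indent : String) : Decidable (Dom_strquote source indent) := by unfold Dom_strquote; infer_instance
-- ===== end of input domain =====

-- B replaces A's manual index-arithmetic while-loop by one-shot segmentation into chunks plus a formatting map/join (idiomatic; same cost).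

-- ===== PORT A =====
-- A's while loop: extend output_parts with (indent, "    '", source[indx:indx+length], "'\n"), indx += length.
-- Recursion on limit - indx; 0 < n (length is clamped to ≥ 50) guarantees termination.
def strquoteLoopA (src indent : List Char) (n : Nat) (hn : 0 < n) (indx : Nat) :
    List (List Char) :=
  if h : indx < src.length then
    [indent, "    '".toList,
     PySem.List.slice src (some (indx : Int)) (some ((indx : Int) + (n : Int))),
     "'\n".toList] ++ strquoteLoopA src indent n hn (indx + n)
  else []
termination_by src.length - indx
decreasing_by omega

def strquote (source : String) (indent : String) : String :=
  let source' := (PySem.Str.replace source "'" "\\'").toList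
  let length0 : Int := 78 - 2 - 4 - (indent.toList.length : Int)
  let length : Int := if length0 < 50 then 50 else length0
  String.ofList (strquoteLoopA source' indent.toList length.toNat
    (by dsimp only [length, length0]; split <;> omega) 0).flatten

-- ===== PORT B =====
-- re.findall('.{1,n}', s, re.S): the greedy chunking of s into runs of at most n chars (n > 0).
def strquoteChunksB (n : Nat) (hn : 0 < n) (l : List Char) : List (List Char) :=
  if l.isEmpty then [] else l.take n :: strquoteChunksB n hn (l.drop n)
termination_by l.length
decreasing_by
  rename_i h
  have : l ≠ [] := by simpa [List.isEmpty_iff] using h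
  have : 0 < l.length := List.length_pos_iff.mpr this
  simp [List.length_drop]; omega

def strquote_alt (source : String) (indent : String) : String :=
  let source' := (PySem.Str.replace source "'" "\\'").toList
  let length : Int := max 50 (72 - (indent.toList.length : Int))
  String.ofList (((strquoteChunksB length.toNat (by omega) source').map
      (fun chunk => indent.toList ++ "    '".toList ++ chunk ++ "'\n".toList)).flatten)

-- ===== PRECONDITION & SPEC =====
def Spec_strquote (source : String) (indent : String) (out : String) : Prop := out = strquote_alt source indent
instance (source : String) (indent : String) (out : String) : Decidable (Spec_strquote source indent out) := by unfold Spec_strquote; infer_instance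

-- ===== CLAIM (what is proved, stated in full; the proofs are below) =====
def Claim_equal_strquote : Prop := ∀ (source : String) (indent : String), Dom_strquote source indent → Spec_strquote source indent (strquote source indent)

-- ===== LEMMAS AND PROOFS =====

-- A's loop from index indx produces exactly the formatted chunks of the remaining suffix.
theorem strquoteLoopA_eq_chunks (src indent : List Char) (n : Nat) (hn : 0 < n)
    (indx : Nat) :
    strquoteLoopA src indent n hn indx =
      ((strquoteChunksB n hn (src.drop indx)).map
        (fun chunk => [indent, "    '".toList, chunk, "'\n".toList])).flatten := by
  rw [strquoteLoopA, strquoteChunksB]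
  split
  · rename_i h
    have hne : ¬ (src.drop indx).isEmpty := by
      simp [List.isEmpty_iff, List.drop_eq_nil_iff]; omega
    rw [if_neg hne]
    rw [strquoteLoopA_eq_chunks src indent n hn (indx + n)]
    have hslice : PySem.List.slice src (some (indx : Int)) (some ((indx : Int) + (n : Int)))
        = (src.drop indx).take n := PySem.List.slice_natCast_add src indx n
    simp [hslice, List.drop_drop, Nat.add_comm]
  · rename_i h
    have : (src.drop indx).isEmpty := by
      simp [List.isEmpty_iff, List.drop_eq_nil_iff]; omega
    rw [if_pos this]; simp
termination_by src.length - indx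
decreasing_by omega

-- the two chunk formats flatten to the same string
theorem flatten_fmt_eq (indent : List Char) (cs : List (List Char)) :
    ((cs.map (fun chunk => [indent, "    '".toList, chunk, "'\n".toList])).flatten).flatten =
      ((cs.map (fun chunk => indent ++ "    '".toList ++ chunk ++ "'\n".toList)).flatten) := by
  induction cs with
  | nil => rfl
  | cons c cs ih =>
    simp only [List.map_cons, List.flatten_cons, List.flatten_append, ih]
    simp

-- ===== VERDICT (by name: the statement is the Claim_ definition above) =====
theorem strquote_spec : Claim_equal_strquote := by
  intro source indent _
  unfold Spec_strquote strquote strquote_alt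
  have hlen : (if (78 - 2 - 4 - (indent.toList.length : Int)) < 50 then (50 : Int)
        else 78 - 2 - 4 - (indent.toList.length : Int))
      = max 50 (72 - (indent.toList.length : Int)) := by split <;> omega
  simp only [hlen]
  congr 1
  rw [strquoteLoopA_eq_chunks, List.drop_zero, flatten_fmt_eq]
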